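-- pv_equiv track=rewrite | github.com/daviDpaD18/04_python_automation | 05-logs.py | get_user_logtimes
-- ===== SOURCE A (Python) =====
-- USER = 0
--
-- LOG = 1
--
-- TIME = 2
--
-- def get_user_logtimes(logs, users):
--     times_logged_in = {}
--     for user in users:
--         user_login_time = 0
--         user_logout_time = 0
--         for log in logs:
--             if log[USER] == user:
--                 if log[LOG] == " logged in":
--                     user_login_time = log[TIME]
--                 elif log[LOG] == " logged out":
--                     user_logout_time = log[TIME]
--         times_logged_in[user] =int(user_logout_time) - int(user_login_time)
--     return times_logged_in
-- ===== SOURCE B (Python) =====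
-- def get_user_logtimes(logs, users):
--     last = {}
--     for user, action, t in logs:
--         last[(user, action)] = t
--     return {u: int(last.get((u, " logged out"), 0)) - int(last.get((u, " logged in"), 0))
--             for u in users}
-- ===== Notes on version B (the rewrite author's own statement) =====
-- stated objective: faster
-- what changed: Replaced the per-user rescan of all logs by a single branch-free pass recording the last timestamp per (user, action) key in one dict, then a dict comprehension doing two lookups per user.
import Mathlib
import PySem

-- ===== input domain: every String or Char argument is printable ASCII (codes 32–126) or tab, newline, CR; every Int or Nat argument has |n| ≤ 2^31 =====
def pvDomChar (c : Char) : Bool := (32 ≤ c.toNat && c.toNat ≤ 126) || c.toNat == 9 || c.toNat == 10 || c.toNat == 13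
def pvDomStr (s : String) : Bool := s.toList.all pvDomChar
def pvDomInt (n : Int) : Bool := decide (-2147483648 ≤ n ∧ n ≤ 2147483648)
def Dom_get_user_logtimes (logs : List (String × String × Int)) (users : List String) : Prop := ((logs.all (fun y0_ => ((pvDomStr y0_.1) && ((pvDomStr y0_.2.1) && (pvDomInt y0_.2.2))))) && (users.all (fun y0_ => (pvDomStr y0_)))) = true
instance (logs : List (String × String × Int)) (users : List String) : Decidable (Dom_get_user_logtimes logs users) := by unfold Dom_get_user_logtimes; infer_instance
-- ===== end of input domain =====

-- B replaces A's per-user rescan of the logs with one branch-free pass into a dict keyed by (user, action), then two lookups per user (faster: O(U+L) vs O(U*L)).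


-- ===== PORT A =====
def get_user_logtimes (logs : List (String × String × Int)) (users : List String) : List (String × Int) :=
  (users.foldl (fun d user =>
    let p := logs.foldl (fun (st : Int × Int) log =>
      if log.1 == user then
        if log.2.1 == " logged in" then (log.2.2, st.2)
        else if log.2.1 == " logged out" then (st.1, log.2.2)
        else st
      else st) ((0 : Int), (0 : Int))
    d.insert user (p.2 - p.1)) (PySem.Dict.empty : PySem.Dict String Int)).items

-- ===== PORT B =====
def get_user_logtimes_alt (logs : List (String × String × Int)) (users : List String) : List (String × Int) :=
  let last : PySem.Dict (String × String) Int :=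
    logs.foldl (fun d log => d.insert (log.1, log.2.1) log.2.2) PySem.Dict.empty
  (PySem.Dict.ofList (users.map fun u =>
      (u, last.getD (u, " logged out") 0 - last.getD (u, " logged in") 0))).items

-- ===== PRECONDITION & SPEC =====
def Spec_get_user_logtimes (logs : List (String × String × Int)) (users : List String) (out : List (String × Int)) : Prop := out = get_user_logtimes_alt logs users
instance (logs : List (String × String × Int)) (users : List String) (out : List (String × Int)) : Decidable (Spec_get_user_logtimes logs users out) := by unfold Spec_get_user_logtimes; infer_instance

-- ===== CLAIM (what is proved, stated in full; the proofs are below) =====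
def Claim_equal_get_user_logtimes : Prop := ∀ (logs : List (String × String × Int)) (users : List String), Dom_get_user_logtimes logs users → Spec_get_user_logtimes logs users (get_user_logtimes logs users)

-- ===== LEMMAS AND PROOFS =====

-- A's per-user scan computes exactly the two lookups in B's (user, action)-keyed dict.
theorem pv_inner (logs : List (String × String × Int)) (d : PySem.Dict (String × String) Int)
    (u : String) :
    logs.foldl (fun (st : Int × Int) log =>
      if log.1 == u then
        if log.2.1 == " logged in" then (log.2.2, st.2)
        else if log.2.1 == " logged out" then (st.1, log.2.2)
        else st
      else st) (d.getD (u, " logged in") 0, d.getD (u, " logged out") 0)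
    = (((logs.foldl (fun d log => d.insert (log.1, log.2.1) log.2.2) d)).getD (u, " logged in") 0,
       ((logs.foldl (fun d log => d.insert (log.1, log.2.1) log.2.2) d)).getD (u, " logged out") 0) := by
  simp only [beq_iff_eq]
  induction logs generalizing d with
  | nil => simp
  | cons log rest ih =>
    obtain ⟨name, act, t⟩ := log
    simp only [List.foldl_cons]
    rw [← ih]
    congr 1
    rw [PySem.Dict.getD_insert, PySem.Dict.getD_insert]
    by_cases hn : name = u <;> by_cases h1 : act = " logged in" <;>
      by_cases h2 : act = " logged out" <;> simp_all [Prod.ext_iff] <;>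
      first
      | exact ⟨fun h => absurd h.symm h1, fun h => absurd h.symm h2⟩
      | (intro h; exact absurd h.symm hn)
      | exact ⟨fun h _ => absurd h.symm hn, fun h _ => absurd h.symm hn⟩

-- ===== VERDICT (by name: the statement is the Claim_ definition above) =====
theorem get_user_logtimes_spec : Claim_equal_get_user_logtimes := by
  unfold Claim_equal_get_user_logtimes Spec_get_user_logtimes
  intro logs users _
  simp only [get_user_logtimes, get_user_logtimes_alt]
  have hof : ∀ (f : String → Int) (us : List String),
      PySem.Dict.ofList (us.map fun u => (u, f u))
      = us.foldl (fun (d : PySem.Dict String Int) u => d.insert u (f u)) PySem.Dict.empty := by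
    intro f us
    simp [PySem.Dict.ofList, PySem.Dict.update, List.foldl_map]
  rw [hof]
  congr 2
  funext d u
  have h := pv_inner logs PySem.Dict.empty u
  simp only [PySem.Dict.getD_empty] at h
  simp only [h]
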